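-- pv_equiv track=rewrite | github.com/63847051/redesigned-carnival | system/hermes-core/core/fuzzy_patch.py | parse_patch
-- ===== SOURCE A (Python) =====
-- from typing import List, Tuple, Optional, Dict, Any
--
-- def parse_patch(patch: str) -> List[Tuple[str, str]]:
--     """
--     解析补丁文件
--
--     返回: [(原始行, 新行), ...]
--     """
--     changes = []
--     lines = patch.splitlines()
--
--     current_old = []
--     current_new = []
--     in_hunk = False
--
--     for line in lines:
--         if line.startswith("@@"):
--             if in_hunk:
--                 if current_old or current_new:
--                     changes.append(("\n".join(current_old), "\n".join(current_new)))
--                 current_old = []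
--                 current_new = []
--             in_hunk = True
--         elif line.startswith("-") and not line.startswith("--"):
--             current_old.append(line[1:])
--         elif line.startswith("+") and not line.startswith("++"):
--             current_new.append(line[1:])
--         elif line.startswith(" "):
--             current_old.append(line[1:])
--             current_new.append(line[1:])
--
--     if current_old or current_new:
--         changes.append(("\n".join(current_old), "\n".join(current_new)))
--
--     return changes
-- ===== SOURCE B (Python) =====
-- def _classify(group):
--     old, new = [], []
--     for line in group:
--         if line.startswith("-") and not line.startswith("--"):
--             old.append(line[1:])
--         elif line.startswith("+") and not line.startswith("++"):
--             new.append(line[1:])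
--         elif line.startswith(" "):
--             old.append(line[1:])
--             new.append(line[1:])
--     return old, new
--
--
-- def parse_patch(patch):
--     # Pass 1: group lines into hunks (the first '@@' does not start a new
--     # group, so pre-hunk lines merge into the first hunk).
--     groups = []
--     cur = []
--     seen = False
--     for line in patch.splitlines():
--         if line.startswith("@@"):
--             if seen:
--                 groups.append(cur)
--                 cur = []
--             seen = True
--         else:
--             cur.append(line)
--     groups.append(cur)
--     # Pass 2: classify each group's lines and emit non-empty hunks.
--     changes = []
--     for g in groups:
--         old, new = _classify(g)
--         if old or new:
--             changes.append(("\n".join(old), "\n".join(new)))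
--     return changes
-- ===== Notes on version B (the rewrite author's own statement) =====
-- stated objective: alternative
-- what changed: Replaced A's single stateful loop (changes/current_old/current_new/in_hunk carried together) by a two-pass decomposition: first group lines into hunks (the first '@@' merges pre-hunk lines into the first group), then classify each group's lines into (old, new) and emit non-empty pairs.
import Mathlib
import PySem

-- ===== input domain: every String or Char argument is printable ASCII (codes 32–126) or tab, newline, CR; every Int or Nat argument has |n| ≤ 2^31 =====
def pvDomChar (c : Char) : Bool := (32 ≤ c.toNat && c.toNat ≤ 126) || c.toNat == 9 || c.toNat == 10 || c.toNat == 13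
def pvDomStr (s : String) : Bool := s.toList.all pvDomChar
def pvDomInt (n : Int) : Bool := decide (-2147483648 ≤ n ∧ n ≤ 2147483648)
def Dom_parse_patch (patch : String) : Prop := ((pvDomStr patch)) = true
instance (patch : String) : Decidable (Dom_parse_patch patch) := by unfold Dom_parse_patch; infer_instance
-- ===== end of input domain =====

-- B re-decomposes A's single stateful loop into two passes (group lines into hunks, then
-- classify each hunk); same return value everywhere (objective: alternative decomposition).

-- ===== PORT A =====
-- A's loop state: (changes, current_old, current_new, in_hunk)
def stepA (st : List (String × String) × List String × List String × Bool) (line : String) :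
    List (String × String) × List String × List String × Bool :=
  let (changes, co, cn, inHunk) := st
  if PySem.Str.startswith line "@@" then
    if inHunk then
      ((if co ≠ [] ∨ cn ≠ [] then
          changes ++ [(PySem.Str.join "\n" co, PySem.Str.join "\n" cn)]
        else changes), [], [], true)
    else (changes, co, cn, true)
  else if PySem.Str.startswith line "-" && !PySem.Str.startswith line "--" then
    (changes, co ++ [PySem.Str.slice line (some 1) none], cn, inHunk)
  else if PySem.Str.startswith line "+" && !PySem.Str.startswith line "++" then
    (changes, co, cn ++ [PySem.Str.slice line (some 1) none], inHunk)
  else if PySem.Str.startswith line " " then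
    (changes, co ++ [PySem.Str.slice line (some 1) none],
      cn ++ [PySem.Str.slice line (some 1) none], inHunk)
  else (changes, co, cn, inHunk)

def parse_patch (patch : String) : List (String × String) :=
  let st := (PySem.Str.splitlines patch).foldl stepA ([], [], [], false)
  if st.2.1 ≠ [] ∨ st.2.2.1 ≠ [] then
    st.1 ++ [(PySem.Str.join "\n" st.2.1, PySem.Str.join "\n" st.2.2.1)]
  else st.1

-- ===== PORT B =====
-- classify one hunk's lines into (old, new)  (Source B's _classify loop)
def stepC (st : List String × List String) (line : String) : List String × List String :=
  let (old, new) := st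
  if PySem.Str.startswith line "-" && !PySem.Str.startswith line "--" then
    (old ++ [PySem.Str.slice line (some 1) none], new)
  else if PySem.Str.startswith line "+" && !PySem.Str.startswith line "++" then
    (old, new ++ [PySem.Str.slice line (some 1) none])
  else if PySem.Str.startswith line " " then
    (old ++ [PySem.Str.slice line (some 1) none], new ++ [PySem.Str.slice line (some 1) none])
  else (old, new)

def classifyB (g : List String) : List String × List String := g.foldl stepC ([], [])

-- pass-1 loop state: (groups, cur, seen)
def stepG (st : List (List String) × List String × Bool) (line : String) :
    List (List String) × List String × Bool :=
  let (groups, cur, seen) := st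
  if PySem.Str.startswith line "@@" then
    (if seen then (groups ++ [cur], [], true) else (groups, cur, true))
  else (groups, cur ++ [line], seen)

-- pass-2 loop body: emit a hunk's pair if non-empty
def stepP (changes : List (String × String)) (g : List String) : List (String × String) :=
  let (old, new) := classifyB g
  if old ≠ [] ∨ new ≠ [] then
    changes ++ [(PySem.Str.join "\n" old, PySem.Str.join "\n" new)]
  else changes

def parse_patch_alt (patch : String) : List (String × String) :=
  let st := (PySem.Str.splitlines patch).foldl stepG ([], [], false)
  (st.1 ++ [st.2.1]).foldl stepP []

-- ===== PRECONDITION & SPEC =====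
def Spec_parse_patch (patch : String) (out : List (String × String)) : Prop := out = parse_patch_alt patch
instance (patch : String) (out : List (String × String)) : Decidable (Spec_parse_patch patch out) := by unfold Spec_parse_patch; infer_instance

-- ===== CLAIM (what is proved, stated in full; the proofs are below) =====
def Claim_equal_parse_patch : Prop := ∀ (patch : String), Dom_parse_patch patch → Spec_parse_patch patch (parse_patch patch)


-- ===== LEMMAS AND PROOFS =====

-- A's final flush (proof-side name for the tail of parse_patch)
def finishA (st : List (String × String) × List String × List String × Bool) :
    List (String × String) :=
  if st.2.1 ≠ [] ∨ st.2.2.1 ≠ [] then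
    st.1 ++ [(PySem.Str.join "\n" st.2.1, PySem.Str.join "\n" st.2.2.1)]
  else st.1

-- recursive (proof-side) form of pass 1: the list of hunks grown from cur with flag seen
def grp : List String → List String → Bool → List (List String)
  | [], cur, _ => [cur]
  | l :: ls, cur, seen =>
    if PySem.Str.startswith l "@@" then
      if seen then cur :: grp ls [] true else grp ls cur true
    else grp ls (cur ++ [l]) seen

-- recursive (proof-side) form of pass 2
def proc : List (List String) → List (String × String)
  | [] => []
  | g :: gs =>
    (if (classifyB g).1 ≠ [] ∨ (classifyB g).2 ≠ [] then
       [(PySem.Str.join "\n" (classifyB g).1, PySem.Str.join "\n" (classifyB g).2)]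
     else []) ++ proc gs

lemma foldG_eq_grp : ∀ (ls : List String) (gs : List (List String)) (cur : List String) (b : Bool),
    ((ls.foldl stepG (gs, cur, b)).1 ++ [(ls.foldl stepG (gs, cur, b)).2.1]) = gs ++ grp ls cur b := by
  intro ls
  induction ls with
  | nil => intro gs cur b; simp [grp]
  | cons l ls ih =>
    intro gs cur b
    by_cases h : PySem.Chars.startswith l.toList ['@', '@'] = true
    · by_cases hb : b = true
      · simp [List.foldl_cons, stepG, grp, h, hb, ih]
      · simp at hb; simp [List.foldl_cons, stepG, grp, h, hb, ih]
    · simp [List.foldl_cons, stepG, grp, h, ih]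

lemma foldP_eq_proc : ∀ (gs : List (List String)) (out : List (String × String)),
    gs.foldl stepP out = out ++ proc gs := by
  intro gs
  induction gs with
  | nil => intro out; simp [proc]
  | cons g gs ih =>
    intro out
    by_cases h : (classifyB g).1 ≠ [] ∨ (classifyB g).2 ≠ []
    · simp [List.foldl_cons, stepP, proc, h, ih]
    · simp [List.foldl_cons, stepP, proc, h, ih]

lemma classify_snoc (cur : List String) (l : String) :
    classifyB (cur ++ [l]) = stepC (classifyB cur) l := by
  simp [classifyB, List.foldl_append]

-- master invariant: A's loop from state (cs, o, n, b), where (o, n) classifies the lines cur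
-- already in the current hunk, finishes to cs ++ proc (grp ls cur b)
lemma main_inv : ∀ (ls : List String) (cs : List (String × String)) (o n cur : List String)
    (b : Bool), classifyB cur = (o, n) →
    finishA (ls.foldl stepA (cs, o, n, b)) = cs ++ proc (grp ls cur b) := by
  intro ls
  induction ls with
  | nil =>
    intro cs o n cur b hcl
    by_cases h : o ≠ [] ∨ n ≠ []
    · simp [finishA, proc, grp, hcl, h]
    · simp [finishA, proc, grp, hcl, h]
  | cons l ls ih =>
    intro cs o n cur b hcl
    by_cases h : PySem.Chars.startswith l.toList ['@', '@'] = true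
    · by_cases hb : b = true
      · subst hb
        by_cases hne : o ≠ [] ∨ n ≠ []
        · have := ih (cs ++ [(PySem.Str.join "\n" o, PySem.Str.join "\n" n)]) [] [] [] true rfl
          simp [List.foldl_cons, stepA, grp, proc, h, hne, hcl, this]
        · have := ih cs [] [] [] true rfl
          simp [List.foldl_cons, stepA, grp, proc, h, hne, hcl, this]
      · simp at hb; subst hb
        have := ih cs o n cur true hcl
        simp [List.foldl_cons, stepA, grp, h, this]
    · have hsn := classify_snoc cur l
      rw [hcl] at hsn
      by_cases h1 : PySem.Chars.startswith l.toList ['-'] = true ∧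
          PySem.Chars.startswith l.toList ['-', '-'] = false
      · have := ih cs (o ++ [PySem.Str.slice l (some 1) none]) n (cur ++ [l]) b
          (by rw [hsn]; simp [stepC, h1.1, h1.2])
        simp [List.foldl_cons, stepA, grp, h, h1.1, h1.2, this]
      · by_cases h2 : PySem.Chars.startswith l.toList ['+'] = true ∧
            PySem.Chars.startswith l.toList ['+', '+'] = false
        · have := ih cs o (n ++ [PySem.Str.slice l (some 1) none]) (cur ++ [l]) b
            (by rw [hsn]; simp [stepC, h1, h2.1, h2.2])
          simp [List.foldl_cons, stepA, grp, h, h1, h2.1, h2.2, this]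
        · by_cases h3 : PySem.Chars.startswith l.toList [' '] = true
          · have := ih cs (o ++ [PySem.Str.slice l (some 1) none])
              (n ++ [PySem.Str.slice l (some 1) none]) (cur ++ [l]) b
              (by rw [hsn]; simp [stepC, h1, h2, h3])
            simp [List.foldl_cons, stepA, grp, h, h1, h2, h3, this]
          · have := ih cs o n (cur ++ [l]) b (by rw [hsn]; simp [stepC, h1, h2, h3])
            simp [List.foldl_cons, stepA, grp, h, h1, h2, h3, this]

-- ===== VERDICT (by name: the statement is the Claim_ definition above) =====
theorem parse_patch_spec : Claim_equal_parse_patch := by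
  intro patch _
  show parse_patch patch = parse_patch_alt patch
  have hb : parse_patch_alt patch = proc (grp (PySem.Str.splitlines patch) [] false) := by
    unfold parse_patch_alt
    rw [foldP_eq_proc, foldG_eq_grp]
    simp
  have ha := main_inv (PySem.Str.splitlines patch) [] [] [] [] false rfl
  simp only [List.nil_append] at ha
  rw [hb, ← ha]
  rfl
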